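-- pv_equiv track=rewrite | github.com/Ishnika/Python-codes- | pattern/inverted_triangle.py | generate_inverted_triangle
-- ===== SOURCE A (Python) =====
-- def generate_inverted_triangle(n):
--     lst1=[]
--     for i in range(n,0,-1):
--         str1=""
--         for j in range(0,i):
--             str1+="*"
--         lst1.append(str1)
--     return lst1
-- ===== SOURCE B (Python) =====
-- def generate_inverted_triangle(n):
--     s = "*" * n
--     return [s[:i] for i in range(n, 0, -1)]
-- ===== Notes on version B (the rewrite author's own statement) =====
-- stated objective: simpler
-- what changed: B precomputes the full star bar once and produces each row as a prefix slice of it in a single comprehension, eliminating A's inner character-by-character accumulation loop.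
import Mathlib
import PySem

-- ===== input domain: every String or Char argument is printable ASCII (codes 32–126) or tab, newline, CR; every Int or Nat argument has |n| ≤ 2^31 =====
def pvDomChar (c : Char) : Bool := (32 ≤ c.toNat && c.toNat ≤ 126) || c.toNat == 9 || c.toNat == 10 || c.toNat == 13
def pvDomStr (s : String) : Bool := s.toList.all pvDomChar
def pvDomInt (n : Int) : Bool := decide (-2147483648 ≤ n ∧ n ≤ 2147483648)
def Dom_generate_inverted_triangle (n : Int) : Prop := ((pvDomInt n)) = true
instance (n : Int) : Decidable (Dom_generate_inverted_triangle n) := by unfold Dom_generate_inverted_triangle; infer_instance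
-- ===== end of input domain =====

-- B replaces A's inner character-accumulation loop by prefix slices of one precomputed bar (objective: simpler).
-- Strings are ported as List Char wrapped with String.ofList, since Python str concatenation/slicing is exact on code points.

-- ===== PORT A =====
-- inner loop: for j in range(0, i): str1 += "*"
def pvRowA (i : Int) : String :=
  String.ofList ((PySem.List.pyRange 0 i 1).foldl (fun str1 _ => str1 ++ ['*']) [])

def generate_inverted_triangle (n : Int) : List String :=
  (PySem.List.pyRange n 0 (-1)).foldl (fun lst1 i => lst1 ++ [pvRowA i]) []

-- ===== PORT B =====
-- s = "*" * n; [s[:i] for i in range(n, 0, -1)]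
def generate_inverted_triangle_alt (n : Int) : List String :=
  let s : List Char := PySem.List.pyRepeat ['*'] n
  (PySem.List.pyRange n 0 (-1)).map (fun i => String.ofList (PySem.List.slice s none (some i)))

-- ===== PRECONDITION & SPEC =====
def Spec_generate_inverted_triangle (n : Int) (out : List String) : Prop := out = generate_inverted_triangle_alt n
instance (n : Int) (out : List String) : Decidable (Spec_generate_inverted_triangle n out) := by unfold Spec_generate_inverted_triangle; infer_instance

-- ===== CLAIM (what is proved, stated in full; the proofs are below) =====
def Claim_equal_generate_inverted_triangle : Prop := ∀ (n : Int), Dom_generate_inverted_triangle n → Spec_generate_inverted_triangle n (generate_inverted_triangle n)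

-- ===== LEMMAS AND PROOFS =====

-- A's inner loop appends one '*' per iteration: it builds a replicate of the range's length.
theorem pv_foldl_star {α : Type} (l : List α) (acc : List Char) :
    l.foldl (fun str1 _ => str1 ++ ['*']) acc = acc ++ List.replicate l.length '*' := by
  induction l generalizing acc with
  | nil => simp
  | cons x xs ih =>
      rw [List.foldl_cons, ih, List.append_assoc]
      simp [List.replicate_succ]

theorem pvRowA_eq (i : Int) : pvRowA i = String.ofList (List.replicate i.toNat '*') := by
  unfold pvRowA
  rw [pv_foldl_star]
  simp [PySem.List.length_pyRange_one]

-- A's outer append-fold is a map.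
theorem pv_foldl_map {α β : Type} (f : α → β) (l : List α) (acc : List β) :
    l.foldl (fun r i => r ++ [f i]) acc = acc ++ l.map f := by
  induction l generalizing acc with
  | nil => simp
  | cons x xs ih => simp [List.foldl, ih]

-- ===== VERDICT (by name: the statement is the Claim_ definition above) =====
theorem generate_inverted_triangle_spec : Claim_equal_generate_inverted_triangle := by
  intro n _
  show generate_inverted_triangle n = generate_inverted_triangle_alt n
  unfold generate_inverted_triangle generate_inverted_triangle_alt
  rw [pv_foldl_map]
  simp only [List.nil_append]
  apply List.map_congr_left
  intro i hi
  rw [PySem.List.mem_pyRange_neg_one] at hi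
  obtain ⟨h1, h2⟩ := hi
  rw [pvRowA_eq, PySem.List.pyRepeat_singleton,
      PySem.List.slice_to _ (by omega : (0:Int) ≤ i), List.take_replicate,
      (by omega : min i.toNat n.toNat = i.toNat)]
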